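-- pv_equiv track=rewrite | github.com/SaDogeCrypto/psc-transcript-search | app/pipeline/smart_extraction.py | _is_digit_transposition
-- ===== SOURCE A (Python) =====
-- def _is_digit_transposition(s1: str, s2: str) -> bool:
--     """Check if s1 and s2 differ by a single transposition."""
--     if len(s1) != len(s2):
--         return False
--     diffs = [(i, c1, c2) for i, (c1, c2) in enumerate(zip(s1, s2)) if c1 != c2]
--     if len(diffs) != 2:
--         return False
--     i, j = diffs[0][0], diffs[1][0]
--     return j == i + 1 and s1[i] == s2[j] and s1[j] == s2[i]
-- ===== SOURCE B (Python) =====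
-- def _is_digit_transposition(s1: str, s2: str) -> bool:
--     """Check if s1 and s2 differ by a single transposition."""
--     if len(s1) != len(s2):
--         return False
--     n = len(s1)
--     i = 0
--     while i < n and s1[i] == s2[i]:
--         i += 1
--     if i >= n - 1:
--         return False
--     return s1[i] == s2[i + 1] and s1[i + 1] == s2[i] and s1[i + 2:] == s2[i + 2:]
-- ===== Notes on version B (the rewrite author's own statement) =====
-- stated objective: simpler
-- what changed: B scans to the first mismatching position and then checks a single adjacent swap plus equality of the remaining suffix, instead of A's building the full list of differing positions and inspecting it afterwards.
import Mathlib
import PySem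

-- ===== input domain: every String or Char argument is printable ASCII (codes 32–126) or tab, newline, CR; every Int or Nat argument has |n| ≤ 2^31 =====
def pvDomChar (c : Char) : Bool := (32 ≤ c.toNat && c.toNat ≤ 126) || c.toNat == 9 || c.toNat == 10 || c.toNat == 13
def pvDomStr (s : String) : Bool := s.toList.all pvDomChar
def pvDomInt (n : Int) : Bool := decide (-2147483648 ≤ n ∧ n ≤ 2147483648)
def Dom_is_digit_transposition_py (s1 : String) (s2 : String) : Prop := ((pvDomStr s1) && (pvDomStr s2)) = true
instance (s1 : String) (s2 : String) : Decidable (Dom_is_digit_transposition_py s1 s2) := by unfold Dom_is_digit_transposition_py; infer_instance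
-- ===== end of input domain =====

-- B replaces A's build-all-diffs-then-inspect pass by a scan to the first mismatch plus one
-- adjacent-swap check and a suffix equality test (objective: simpler, same O(n) cost).

-- ===== PORT A =====
def is_digit_transposition_py (s1 : String) (s2 : String) : Bool :=
  if PySem.Str.len s1 ≠ PySem.Str.len s2 then false
  else
    let diffs := ((PySem.List.enumerate (s1.toList.zip s2.toList) 0).filter
        (fun p => p.2.1 != p.2.2)).map (fun p => (p.1, p.2.1, p.2.2))
    if diffs.length ≠ 2 then false
    else
      -- diffs[0][0] / diffs[1][0]: in range because len(diffs) = 2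
      let i := (PySem.List.pyGetD diffs 0 (0, ' ', ' ')).1
      let j := (PySem.List.pyGetD diffs 1 (0, ' ', ' ')).1
      (j == i + 1) && (PySem.Str.pyGet? s1 i == PySem.Str.pyGet? s2 j)
        && (PySem.Str.pyGet? s1 j == PySem.Str.pyGet? s2 i)

-- ===== PORT B =====
-- B's scan loop `while i < n and s1[i] == s2[i]` as structural recursion over the two
-- character lists; the adjacent-swap check and the suffix comparison s1[i+2:] == s2[i+2:]
-- become the inner match on the two tails.
def pvAltCore : List Char → List Char → Bool
  | a :: t1, b :: t2 =>
      if a = b then pvAltCore t1 t2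
      else
        match t1, t2 with
        | c :: r1, d :: r2 => (a == d) && (c == b) && (r1 == r2)
        | _, _ => false
  | _, _ => false

def is_digit_transposition_py_alt (s1 : String) (s2 : String) : Bool :=
  if PySem.Str.len s1 ≠ PySem.Str.len s2 then false
  else pvAltCore s1.toList s2.toList

-- ===== PRECONDITION & SPEC =====
def Spec_is_digit_transposition_py (s1 : String) (s2 : String) (out : Bool) : Prop := out = is_digit_transposition_py_alt s1 s2
instance (s1 : String) (s2 : String) (out : Bool) : Decidable (Spec_is_digit_transposition_py s1 s2 out) := by unfold Spec_is_digit_transposition_py; infer_instance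

-- ===== CLAIM (what is proved, stated in full; the proofs are below) =====
def Claim_equal_is_digit_transposition_py : Prop := ∀ (s1 : String) (s2 : String), Dom_is_digit_transposition_py s1 s2 → Spec_is_digit_transposition_py s1 s2 (is_digit_transposition_py s1 s2)

-- ===== LEMMAS AND PROOFS =====

-- the diff list A builds, computed structurally (index 0-based, shifted as we descend)
def pvDif : List Char → List Char → List (Int × Char × Char)
  | a :: t1, b :: t2 =>
      if a = b then (pvDif t1 t2).map (fun p => (p.1 + 1, p.2))
      else (0, a, b) :: (pvDif t1 t2).map (fun p => (p.1 + 1, p.2))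
  | _, _ => []

-- A's final test, expressed on the stored characters of the diff list
def pvAMatch (ds : List (Int × Char × Char)) : Bool :=
  match ds with
  | [d0, d1] => (d1.1 == d0.1 + 1) && (d0.2.1 == d1.2.2) && (d1.2.1 == d0.2.2)
  | _ => false

theorem pvDif_eq (l1 l2 : List Char) (s : Int) :
    ((PySem.List.enumerate (l1.zip l2) s).filter (fun p => p.2.1 != p.2.2)).map
        (fun p => (p.1, p.2.1, p.2.2)) =
      (pvDif l1 l2).map (fun p => (p.1 + s, p.2)) := by
  induction l1 generalizing l2 s with
  | nil => simp [pvDif]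
  | cons a t1 ih =>
    cases l2 with
    | nil => simp [pvDif]
    | cons b t2 =>
      by_cases hab : a = b <;>
        simp [pvDif, hab, PySem.List.enumerate_cons, ih t2 (s + 1), List.map_map,
          Function.comp_def] <;>
        (intro i c1 c2 _; omega)

theorem pvDif_nonneg (l1 l2 : List Char) : ∀ p ∈ pvDif l1 l2, 0 ≤ p.1 := by
  induction l1 generalizing l2 with
  | nil => simp [pvDif]
  | cons a t1 ih =>
    cases l2 with
    | nil => simp [pvDif]
    | cons b t2 =>
      intro p hp
      by_cases hab : a = b <;> simp [pvDif, hab] at hp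
      · obtain ⟨q, c1, c2, hq, rfl⟩ := hp
        have := ih t2 (q, c1, c2) hq; simp at this ⊢; omega
      · rcases hp with rfl | ⟨q, c1, c2, hq, rfl⟩
        · simp
        · have := ih t2 (q, c1, c2) hq; simp at this ⊢; omega

theorem pvDif_nil_iff (l1 l2 : List Char) (h : l1.length = l2.length) :
    pvDif l1 l2 = [] ↔ l1 = l2 := by
  induction l1 generalizing l2 with
  | nil => cases l2 <;> simp [pvDif] at h ⊢
  | cons a t1 ih =>
    cases l2 with
    | nil => simp at h
    | cons b t2 =>
      simp only [List.length_cons] at h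
      by_cases hab : a = b <;> simp [pvDif, hab, ih t2 (by omega)]

theorem pvDif_mem (l1 l2 : List Char) :
    ∀ p ∈ pvDif l1 l2, ∃ k : Nat, p.1 = (k : Int) ∧ l1[k]? = some p.2.1 ∧ l2[k]? = some p.2.2 := by
  induction l1 generalizing l2 with
  | nil => simp [pvDif]
  | cons a t1 ih =>
    cases l2 with
    | nil => simp [pvDif]
    | cons b t2 =>
      intro p hp
      by_cases hab : a = b <;> simp [pvDif, hab] at hp
      · obtain ⟨q, c1, c2, hq, rfl⟩ := hp
        obtain ⟨k, hk, h1, h2⟩ := ih t2 (q, c1, c2) hq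
        exact ⟨k + 1, by simp at hk ⊢; omega, by simpa using h1, by simpa using h2⟩
      · rcases hp with rfl | ⟨q, c1, c2, hq, rfl⟩
        · exact ⟨0, by simp⟩
        · obtain ⟨k, hk, h1, h2⟩ := ih t2 (q, c1, c2) hq
          exact ⟨k + 1, by simp at hk ⊢; omega, by simpa using h1, by simpa using h2⟩

theorem pvCore (l1 l2 : List Char) (h : l1.length = l2.length) :
    pvAMatch (pvDif l1 l2) = pvAltCore l1 l2 := by
  induction l1 generalizing l2 with
  | nil => cases l2 <;> simp_all [pvDif, pvAMatch, pvAltCore]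
  | cons a t1 ih =>
    cases l2 with
    | nil => simp at h
    | cons b t2 =>
      simp only [List.length_cons] at h
      have h' : t1.length = t2.length := by omega
      by_cases hab : a = b
      · -- heads equal: the diff list is the shifted tail diff list
        rw [show pvDif (a :: t1) (b :: t2) = (pvDif t1 t2).map (fun p => (p.1 + 1, p.2)) by
              simp [pvDif, hab],
            show pvAltCore (a :: t1) (b :: t2) = pvAltCore t1 t2 by simp [pvAltCore, hab],
            ← ih t2 h']
        cases hds : pvDif t1 t2 with
        | nil => simp [pvAMatch]
        | cons x r =>
          cases r with
          | nil => simp [pvAMatch]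
          | cons y r' =>
            cases r' with
            | nil =>
              simp only [List.map_cons, List.map_nil, pvAMatch]
              have hb : (y.1 + 1 == x.1 + 1 + 1) = (y.1 == x.1 + 1) := by
                by_cases hxy : y.1 = x.1 + 1
                · simp [hxy]
                · have h2 : ¬ (y.1 + 1 = x.1 + 1 + 1) := by omega
                  simp [hxy, h2]
              rw [hb]
            | cons z r'' => simp [pvAMatch]
      · rw [show pvDif (a :: t1) (b :: t2) = (0, a, b) :: (pvDif t1 t2).map (fun p => (p.1 + 1, p.2))
              by simp [pvDif, hab]]
        cases t1 with
        | nil =>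
          cases t2 with
          | nil => simp [pvDif, pvAMatch, pvAltCore, hab]
          | cons d r2 => simp at h'
        | cons c r1 =>
          cases t2 with
          | nil => simp at h'
          | cons d r2 =>
            simp only [List.length_cons] at h'
            have h'' : r1.length = r2.length := by omega
            rw [show pvAltCore (a :: c :: r1) (b :: d :: r2) =
                ((a == d) && (c == b) && (r1 == r2)) by simp [pvAltCore, hab]]
            by_cases hcd : c = d
            · rw [show pvDif (c :: r1) (d :: r2) = (pvDif r1 r2).map (fun p => (p.1 + 1, p.2)) by
                  simp [pvDif, hcd]]
              cases hds : pvDif r1 r2 with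
              | nil =>
                -- no further diff: only one diff in total, A returns false; and the swap
                -- conditions a = d = c, c = b would force a = b, so B is false too
                subst hcd
                have hcc : ((a == c) && (c == b)) = false := by
                  by_cases hac : a = c <;> by_cases hcb : c = b <;> simp_all
                simp [pvAMatch, hcc]
              | cons e rest =>
                have he : 0 ≤ e.1 := pvDif_nonneg r1 r2 e (by simp [hds])
                have hr : r1 ≠ r2 := by
                  intro hrr
                  rw [(pvDif_nil_iff r1 r2 h'').mpr hrr] at hds
                  simp at hds
                cases rest with
                | nil =>
                  simp only [List.map_cons, List.map_nil, pvAMatch]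
                  have hne : (e.1 + 1 + 1 == 1) = false := by
                    simp only [beq_eq_false_iff_ne, ne_eq]
                    omega
                  have hrf : (r1 == r2) = false := by simp [hr]
                  simp [hne, hrf]
                | cons f rest' => simp [pvAMatch, hr]
            · rw [show pvDif (c :: r1) (d :: r2) = (0, c, d) :: (pvDif r1 r2).map
                    (fun p => (p.1 + 1, p.2)) by simp [pvDif, hcd]]
              cases hds : pvDif r1 r2 with
              | nil =>
                have hr : r1 = r2 := (pvDif_nil_iff r1 r2 h'').mp hds
                simp [pvAMatch, hr, Bool.and_comm]
              | cons e rest =>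
                have hr : r1 ≠ r2 := by
                  intro hrr
                  rw [(pvDif_nil_iff r1 r2 h'').mpr hrr] at hds
                  simp at hds
                simp [pvAMatch, hr]

-- ===== VERDICT (by name: the statement is the Claim_ definition above) =====
theorem is_digit_transposition_py_spec : Claim_equal_is_digit_transposition_py := by
  intro s1 s2 _
  unfold Spec_is_digit_transposition_py is_digit_transposition_py is_digit_transposition_py_alt
  by_cases hlen : PySem.Str.len s1 ≠ PySem.Str.len s2
  · rw [if_pos hlen, if_pos hlen]
  · rw [if_neg hlen, if_neg hlen]
    have hl : s1.toList.length = s2.toList.length := by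
      rw [not_not, PySem.Str.len_eq, PySem.Str.len_eq] at hlen; exact_mod_cast hlen
    rw [← pvCore s1.toList s2.toList hl]
    cases hds : pvDif s1.toList s2.toList with
    | nil => simp [pvDif_eq s1.toList s2.toList 0, hds, pvAMatch]
    | cons d0 r =>
      cases r with
      | nil => simp [pvDif_eq s1.toList s2.toList 0, hds, pvAMatch]
      | cons d1 r' =>
        cases r' with
        | cons z r'' => simp [pvDif_eq s1.toList s2.toList 0, hds, pvAMatch]
        | nil =>
          obtain ⟨k0, hk0, h01, h02⟩ := pvDif_mem s1.toList s2.toList d0 (by simp [hds])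
          obtain ⟨k1, hk1, h11, h12⟩ := pvDif_mem s1.toList s2.toList d1 (by simp [hds])
          simp only [pvDif_eq s1.toList s2.toList 0, hds]
          simp [pvAMatch, hk0, hk1, h01, h02, h11, h12, PySem.List.pyGetD]
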